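-- pv_equiv track=rewrite | github.com/jarems421/human-random-detector | src/generate_data.py | _current_run_length
-- ===== SOURCE A (Python) =====
-- def _current_run_length(seq):
--     if not seq:
--         return 0
--
--     run = 1
--
--     for bit in reversed(seq[:-1]):
--         if bit != seq[-1]:
--             break
--         run += 1
--
--     return run
-- ===== SOURCE B (Python) =====
-- def _current_run_length(seq):
--     prev = None
--     run = 0
--     for bit in seq:
--         if run and bit == prev:
--             run += 1
--         else:
--             run = 1
--         prev = bit
--     return run
-- ===== Notes on version B (the rewrite author's own statement) =====
-- stated objective: alternative
-- what changed: Replaces A's backward scan from the end with an early break by a single forward fold keeping (prev, run) and never breaking.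
import Mathlib
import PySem

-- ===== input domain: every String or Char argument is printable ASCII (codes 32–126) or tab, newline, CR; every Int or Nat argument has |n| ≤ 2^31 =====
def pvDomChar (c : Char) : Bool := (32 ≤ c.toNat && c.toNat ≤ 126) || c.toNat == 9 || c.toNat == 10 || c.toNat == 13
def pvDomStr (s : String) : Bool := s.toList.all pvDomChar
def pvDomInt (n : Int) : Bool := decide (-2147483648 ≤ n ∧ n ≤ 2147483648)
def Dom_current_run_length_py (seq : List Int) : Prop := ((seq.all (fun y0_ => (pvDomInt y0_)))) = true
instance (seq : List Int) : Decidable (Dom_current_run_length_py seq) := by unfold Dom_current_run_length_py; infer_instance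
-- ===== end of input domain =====

-- B replaces A's backward early-break scan by a single forward fold keeping (prev, run); same O(n) cost.


-- ===== PORT A =====
-- the for-loop with break over reversed(seq[:-1]): stops at the first element ≠ t
def pvRunBack (t : Int) : List Int → Int
  | [] => 0
  | b :: rest => if b ≠ t then 0 else 1 + pvRunBack t rest

def current_run_length_py (seq : List Int) : Int :=
  match seq.getLast? with
  | none => 0                                        -- if not seq: return 0
  | some t => 1 + pvRunBack t seq.dropLast.reverse   -- run = 1; loop over reversed(seq[:-1])

-- ===== PORT B =====
-- one loop step: state = (prev, run)
def pvStepB (s : Option Int × Int) (bit : Int) : Option Int × Int :=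
  if s.2 ≠ 0 ∧ some bit = s.1 then (some bit, s.2 + 1) else (some bit, 1)

def current_run_length_py_alt (seq : List Int) : Int :=
  (seq.foldl pvStepB (none, 0)).2

-- ===== PRECONDITION & SPEC =====
def Spec_current_run_length_py (seq : List Int) (out : Int) : Prop := out = current_run_length_py_alt seq
instance (seq : List Int) (out : Int) : Decidable (Spec_current_run_length_py seq out) := by unfold Spec_current_run_length_py; infer_instance

-- ===== CLAIM (what is proved, stated in full; the proofs are below) =====
def Claim_equal_current_run_length_py : Prop := ∀ (seq : List Int), Dom_current_run_length_py seq → Spec_current_run_length_py seq (current_run_length_py seq)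

-- ===== LEMMAS AND PROOFS =====

theorem pvFold_char (seq : List Int) :
    seq.foldl pvStepB (none, 0) = (seq.getLast?, current_run_length_py seq) := by
  induction seq using List.reverseRecOn with
  | nil => simp [current_run_length_py]
  | append_singleton xs b ih =>
    rw [List.foldl_append, ih]
    rcases List.eq_nil_or_concat xs with h | ⟨ys, l, h⟩
    · subst h
      simp [pvStepB, current_run_length_py, pvRunBack]
    · subst h
      simp only [List.concat_eq_append] at ih ⊢
      have hlast : (ys ++ [l]).getLast? = some l := by simp
      have hA : current_run_length_py (ys ++ [l]) = 1 + pvRunBack l ys.reverse := by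
        simp [current_run_length_py]
      have hA' : current_run_length_py (ys ++ [l] ++ [b]) =
          1 + pvRunBack b (l :: ys.reverse) := by
        simp [current_run_length_py]
      rw [hlast, hA, hA']
      by_cases hb : b = l
      · subst hb
        have hnn : (0:Int) ≤ pvRunBack b ys.reverse := by
          induction ys.reverse with
          | nil => simp [pvRunBack]
          | cons c cs ih2 =>
            simp only [pvRunBack]
            split <;> omega
        have h0 : ¬ (1 + pvRunBack b ys.reverse = 0) := by omega
        simp [pvStepB, pvRunBack, h0]
        omega
      · simp [pvStepB, pvRunBack, hb, Ne.symm hb]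

-- ===== VERDICT (by name: the statement is the Claim_ definition above) =====
theorem current_run_length_py_spec : Claim_equal_current_run_length_py := by
  intro seq _
  unfold Spec_current_run_length_py current_run_length_py_alt
  rw [pvFold_char]
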